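-- pv_equiv track=rewrite | github.com/mufis-coder/CP-All | HackerRank/IndoBelajar-Pyhton/[HackerRank 37] Ulasan Soal Picking Numbers (Algoritma Pemrograman tingkat kesulitan mudah).py | pickingNumbers
-- ===== SOURCE A (Python) =====
-- def pickingNumbers(a):
--     # Write your code here
--     unik = sorted(set(a))
--     n_max = max([a.count(x) for x in unik])
--     for x, y in zip(unik[:-1], unik[1:]):
--         if (abs(x-y)) not in (1, 0):
--             continue
--         n = a.count(x) + a.count(y)
--         n_max = max(n_max, n)
--     return n_max
-- ===== SOURCE B (Python) =====
-- def pickingNumbers(a):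
--     # Sort the whole list and slide a two-pointer window over it, keeping
--     # s[right] - s[left] <= 1; the answer is the max of the window lengths.
--     # max([]) raises ValueError on empty input, exactly like A.
--     s = sorted(a)
--     left = 0
--     lengths = []
--     for right in range(len(s)):
--         while s[right] - s[left] > 1:
--             left += 1
--         lengths.append(right - left + 1)
--     return max(lengths)
-- ===== Notes on version B (the rewrite author's own statement) =====
-- stated objective: faster
-- what changed: B sorts the whole list and slides a two-pointer window (advancing left while s[right]-s[left]>1), taking the max window length, instead of A's sorted-unique-values table with repeated a.count scans over adjacent value pairs; Pre_ excludes only the empty list, on which both raise ValueError.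
-- outside the precondition, e.g. on pickingNumbers([]): A raises ValueError, B raises ValueError
import Mathlib
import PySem

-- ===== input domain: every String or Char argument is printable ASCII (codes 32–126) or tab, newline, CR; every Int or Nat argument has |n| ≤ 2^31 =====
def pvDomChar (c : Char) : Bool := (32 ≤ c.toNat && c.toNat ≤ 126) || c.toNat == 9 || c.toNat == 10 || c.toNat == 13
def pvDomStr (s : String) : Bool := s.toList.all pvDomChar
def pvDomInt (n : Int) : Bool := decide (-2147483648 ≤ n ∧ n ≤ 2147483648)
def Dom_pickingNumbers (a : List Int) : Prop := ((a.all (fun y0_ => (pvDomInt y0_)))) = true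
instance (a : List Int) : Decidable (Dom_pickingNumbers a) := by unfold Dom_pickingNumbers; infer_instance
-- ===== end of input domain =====

-- B sorts the whole list and slides a two-pointer window (left advances while
-- s[right]-s[left] > 1), taking the max window length, instead of A's table of
-- sorted unique values with repeated count scans; Pre_ excludes only the empty
-- list, on which both Pythons raise ValueError (max of an empty sequence).


-- ===== PORT A =====
def pickingNumbers (a : List Int) : Int :=
  -- unik = sorted(set(a))
  let unik := PySem.List.sorted (PySem.Set.ofList a) (fun x => x) false
  -- n_max = max([a.count(x) for x in unik])   (max([]) raises ValueError: excluded by Pre_)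
  let n_max0 : Int :=
    match PySem.List.max? (unik.map (fun x => (PySem.List.count a x : Int))) (fun v => v) with
    | some v => v
    | none => 0
  -- for x, y in zip(unik[:-1], unik[1:]): if abs(x-y) not in (1,0): continue; n_max = max(n_max, n)
  ((PySem.List.slice unik none (some (-1))).zip (PySem.List.slice unik (some 1) none)).foldl
    (fun n_max p =>
      if ¬ ((p.1 - p.2).natAbs = 1 ∨ (p.1 - p.2).natAbs = 0) then n_max
      else max n_max ((PySem.List.count a p.1 : Int) + (PySem.List.count a p.2 : Int)))
    n_max0

-- ===== PORT B =====
-- while s[right] - s[left] > 1: left += 1   (the executed accesses are always in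
-- range, so getD 0 is the in-range access; the 'l < r' guard only makes the while
-- loop total — when l = r the value condition is false anyway)
def pvAdvance (s : List Int) (r l : Nat) : Nat :=
  if h : l < r ∧ s.getD r 0 - s.getD l 0 > 1 then pvAdvance s r (l + 1) else l
termination_by r - l
decreasing_by omega

def pickingNumbers_alt (a : List Int) : Int :=
  -- s = sorted(a)
  let s := PySem.List.sorted a (fun x => x) false
  -- left = 0; lengths = []; for right in range(len(s)): while …: left += 1; lengths.append(right-left+1)
  let st := (List.range s.length).foldl
    (fun (st : Nat × List Int) r =>
      let left := pvAdvance s r st.1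
      (left, st.2 ++ [((r : Int) - (left : Int) + 1)]))
    (0, [])
  -- return max(lengths)   (max of empty: ValueError, excluded by Pre_)
  match PySem.List.max? st.2 (fun v => v) with
  | some v => v
  | none => 0

-- ===== PRECONDITION & SPEC =====
-- Pre_ excludes exactly the empty list: there both Pythons' max([]) raises ValueError.
def Pre_pickingNumbers (a : List Int) : Prop := a ≠ []
instance (a : List Int) : Decidable (Pre_pickingNumbers a) := by unfold Pre_pickingNumbers; infer_instance
def pvWitness_pickingNumbers : List Int := [4, 6, 5, 3, 3, 1]

def Spec_pickingNumbers (a : List Int) (out : Int) : Prop := out = pickingNumbers_alt a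
instance (a : List Int) (out : Int) : Decidable (Spec_pickingNumbers a out) := by unfold Spec_pickingNumbers; infer_instance

-- ===== CLAIM (what is proved, stated in full; the proofs are below) =====
def Claim_equal_pickingNumbers : Prop := ∀ (a : List Int), Dom_pickingNumbers a → Pre_pickingNumbers a → Spec_pickingNumbers a (pickingNumbers a)

-- ===== LEMMAS AND PROOFS =====

-- the common value both programs compute: max over the distinct x of count(x)+count(x+1)
def pvMidVal (a : List Int) : Int :=
  match PySem.List.max? ((PySem.Set.ofList a).map
      (fun x => (List.count x a : Int) + (List.count (x + 1) a : Int))) (fun v => v) with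
  | some v => v
  | none => 0

-- the body of A's update loop
def pvStep (a : List Int) (n_max : Int) (p : Int × Int) : Int :=
  if ¬ ((p.1 - p.2).natAbs = 1 ∨ (p.1 - p.2).natAbs = 0) then n_max
  else max n_max ((PySem.List.count a p.1 : Int) + (PySem.List.count a p.2 : Int))

-- A's loop keeps its accumulator ≥ the start and ≥ every admitted pair sum
lemma pvFold_ge (a : List Int) (l : List (Int × Int)) (init : Int) :
    init ≤ l.foldl (pvStep a) init ∧
    ∀ p ∈ l, ((p.1 - p.2).natAbs = 1 ∨ (p.1 - p.2).natAbs = 0) →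
      (PySem.List.count a p.1 : Int) + (PySem.List.count a p.2 : Int) ≤ l.foldl (pvStep a) init := by
  induction l generalizing init with
  | nil => simp
  | cons q t ih =>
    have hstep : init ≤ pvStep a init q := by
      unfold pvStep; split_ifs <;> simp
    obtain ⟨ih1, ih2⟩ := ih (pvStep a init q)
    refine ⟨le_trans hstep ih1, ?_⟩
    intro p hp hc
    rcases List.mem_cons.mp hp with hp | hp
    · subst hp
      have : (PySem.List.count a p.1 : Int) + (PySem.List.count a p.2 : Int) ≤ pvStep a init p := by
        unfold pvStep
        rw [if_neg (not_not_intro hc)]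
        exact le_max_right _ _
      exact le_trans this ih1
    · exact ih2 p hp hc

-- A's loop result stays below any bound dominating the start and all admitted pair sums
lemma pvFold_le (a : List Int) (l : List (Int × Int)) (init K : Int)
    (h0 : init ≤ K)
    (h : ∀ p ∈ l, ((p.1 - p.2).natAbs = 1 ∨ (p.1 - p.2).natAbs = 0) →
      (PySem.List.count a p.1 : Int) + (PySem.List.count a p.2 : Int) ≤ K) :
    l.foldl (pvStep a) init ≤ K := by
  induction l generalizing init with
  | nil => simpa using h0
  | cons q t ih =>
    refine ih (pvStep a init q) ?_ (fun p hp hc => h p (List.mem_cons_of_mem _ hp) hc)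
    unfold pvStep; split_ifs with hcq
    · exact max_le h0 (h q List.mem_cons_self hcq)
    · exact h0

-- every pair produced by zip(u[:-1], u[1:]) on a strictly increasing u consists of two
-- members of u in increasing order
lemma pvZip_mem (u : List Int) (hu : u.Pairwise (· < ·)) :
    ∀ p ∈ u.dropLast.zip u.tail, p.1 ∈ u ∧ p.2 ∈ u ∧ p.1 < p.2 := by
  induction u with
  | nil => simp
  | cons x t ih =>
    cases t with
    | nil => simp
    | cons y s =>
      intro p hp
      rw [List.dropLast_cons₂, List.tail_cons, List.zip_cons_cons] at hp
      rcases List.mem_cons.mp hp with hp | hp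
      · subst hp
        exact ⟨List.mem_cons_self, List.mem_cons_of_mem _ List.mem_cons_self,
          (List.pairwise_cons.mp hu).1 y List.mem_cons_self⟩
      · have := ih (List.pairwise_cons.mp hu).2 p (by simpa using hp)
        exact ⟨List.mem_cons_of_mem _ this.1, List.mem_cons_of_mem _ this.2.1, this.2.2⟩

-- on a strictly increasing u, two consecutive integers of u occupy adjacent positions:
-- (x, x+1) is produced by zip(u[:-1], u[1:])
lemma pvZip_adj (u : List Int) (hu : u.Pairwise (· < ·)) (x : Int)
    (hx : x ∈ u) (hx1 : x + 1 ∈ u) : (x, x + 1) ∈ u.dropLast.zip u.tail := by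
  induction u with
  | nil => simp at hx
  | cons z t ih =>
    have hzt := List.pairwise_cons.mp hu
    cases t with
    | nil =>
      simp only [List.mem_cons, List.not_mem_nil, or_false] at hx hx1
      omega
    | cons w s =>
      rw [List.dropLast_cons₂, List.tail_cons, List.zip_cons_cons]
      by_cases hxz : x = z
      · subst hxz
        have hne : x + 1 ≠ x := by omega
        have : x + 1 = w := by
          rcases List.mem_cons.mp hx1 with h | h
          · omega
          · rcases List.mem_cons.mp h with h | h
            · omega
            · have hw : w < x + 1 := by
                have := (List.pairwise_cons.mp hzt.2).1 _ h
                omega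
              have : x < w := hzt.1 w List.mem_cons_self
              omega
        rw [this]
        exact List.mem_cons_self
      · have hxt : x ∈ w :: s := by
          rcases List.mem_cons.mp hx with h | h
          · exact absurd h hxz
          · exact h
        have hx1t : x + 1 ∈ w :: s := by
          rcases List.mem_cons.mp hx1 with h | h
          · have := hzt.1 x hxt
            omega
          · exact h
        exact List.mem_cons_of_mem _ (ih hzt.2 hxt hx1t)

-- A computes pvMidVal
lemma pvA_eq_mid (a : List Int) (hne : a ≠ []) : pickingNumbers a = pvMidVal a := by
  unfold pickingNumbers pvMidVal
  simp only [PySem.List.count_eq, PySem.List.slice_to_neg_one, PySem.List.slice_from_one]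
  set u := PySem.List.sorted (PySem.Set.ofList a) (fun x => x) false with hu
  have hpw : u.Pairwise (· < ·) := PySem.List.sorted_ofList_pairwise_lt a
  have hmemu : ∀ x : Int, x ∈ u ↔ x ∈ a := by
    intro x
    rw [hu, PySem.List.mem_sorted, PySem.Set.mem_ofList]
  have hOne : PySem.Set.ofList a ≠ [] := by
    cases a with
    | nil => exact absurd rfl hne
    | cons b t =>
      intro h
      have : b ∈ PySem.Set.ofList (b :: t) := (PySem.Set.mem_ofList _ _).mpr List.mem_cons_self
      rw [h] at this
      exact List.not_mem_nil this
  have hune : u ≠ [] := by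
    rw [hu]
    intro h
    exact hOne ((PySem.List.sorted_eq_nil_iff _ _ _).mp h)
  obtain ⟨mB, hB⟩ : ∃ mB, PySem.List.max?
      ((PySem.Set.ofList a).map (fun x => ((List.count x a : Int) + (List.count (x + 1) a : Int))))
      (fun v => v) = some mB := by
    cases h : PySem.List.max?
        ((PySem.Set.ofList a).map (fun x => ((List.count x a : Int) + (List.count (x + 1) a : Int))))
        (fun v => (v : Int)) with
    | none =>
      have := (PySem.List.max?_eq_none_iff _ _).mp h
      rw [List.map_eq_nil_iff] at this
      exact absurd this hOne
    | some v => exact ⟨v, rfl⟩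
  obtain ⟨m0, hA0⟩ : ∃ m0, PySem.List.max?
      (u.map (fun x => (List.count x a : Int))) (fun v => v) = some m0 := by
    cases h : PySem.List.max? (u.map (fun x => (List.count x a : Int))) (fun v => (v : Int)) with
    | none =>
      have := (PySem.List.max?_eq_none_iff _ _).mp h
      rw [List.map_eq_nil_iff] at this
      exact absurd this hune
    | some v => exact ⟨v, rfl⟩
  rw [hA0, hB]
  dsimp only
  show List.foldl (pvStep a) m0 (u.dropLast.zip u.tail) = mB
  obtain ⟨xB, hxB, hmB⟩ := List.mem_map.mp (PySem.List.max?_mem hB)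
  have hxBa : xB ∈ a := (PySem.Set.mem_ofList _ _).mp hxB
  have hBmax : ∀ x : Int, x ∈ a →
      (List.count x a : Int) + (List.count (x + 1) a : Int) ≤ mB := by
    intro x hx
    exact PySem.List.max?_isMax hB _ (List.mem_map.mpr ⟨x, (PySem.Set.mem_ofList _ _).mpr hx, rfl⟩)
  obtain ⟨x0, hx0, hm0⟩ := List.mem_map.mp (PySem.List.max?_mem hA0)
  have hA0max : ∀ x : Int, x ∈ u → (List.count x a : Int) ≤ m0 := by
    intro x hx
    exact PySem.List.max?_isMax hA0 _ (List.mem_map.mpr ⟨x, hx, rfl⟩)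
  apply le_antisymm
  · apply pvFold_le
    · rw [← hm0]
      calc (List.count x0 a : Int)
          ≤ (List.count x0 a : Int) + (List.count (x0 + 1) a : Int) :=
            le_add_of_nonneg_right (Int.natCast_nonneg _)
        _ ≤ mB := hBmax x0 ((hmemu x0).mp hx0)
    · intro p hp hc
      obtain ⟨hp1, hp2, hlt⟩ := pvZip_mem u hpw p hp
      have h21 : p.2 = p.1 + 1 := by omega
      rw [h21]
      exact hBmax p.1 ((hmemu p.1).mp hp1)
  · rw [← hmB]
    by_cases hx1 : xB + 1 ∈ a
    · have hpair := pvZip_adj u hpw xB ((hmemu xB).mpr hxBa) ((hmemu _).mpr hx1)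
      have := (pvFold_ge a (u.dropLast.zip u.tail) m0).2 (xB, xB + 1) hpair (by simp)
      simpa using this
    · have hc0 : List.count (xB + 1) a = 0 := List.count_eq_zero.mpr hx1
      have h1 : (List.count xB a : Int) ≤ m0 := hA0max xB ((hmemu xB).mpr hxBa)
      have h2 := (pvFold_ge a (u.dropLast.zip u.tail) m0).1
      rw [hc0]
      simpa using le_trans h1 h2

-- ----- B side -----

-- the specification of the while loop: result between l and r, condition false at the
-- result, condition true strictly below it
lemma pvAdvance_spec (s : List Int) (r : Nat) : ∀ l, l ≤ r →
    l ≤ pvAdvance s r l ∧ pvAdvance s r l ≤ r ∧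
    s.getD r 0 - s.getD (pvAdvance s r l) 0 ≤ 1 ∧
    (∀ k, l ≤ k → k < pvAdvance s r l → s.getD r 0 - s.getD k 0 > 1) := by
  have key : ∀ fuel l, r - l ≤ fuel → l ≤ r →
      l ≤ pvAdvance s r l ∧ pvAdvance s r l ≤ r ∧
      s.getD r 0 - s.getD (pvAdvance s r l) 0 ≤ 1 ∧
      (∀ k, l ≤ k → k < pvAdvance s r l → s.getD r 0 - s.getD k 0 > 1) := by
    intro fuel
    induction fuel with
    | zero =>
      intro l hf hlr
      have hl : l = r := by omega
      rw [pvAdvance, dif_neg (by omega)]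
      subst hl
      exact ⟨le_rfl, le_rfl, by omega, fun k hk hk2 => absurd hk2 (by omega)⟩
    | succ n ih =>
      intro l hf hlr
      rw [pvAdvance]
      by_cases h : l < r ∧ s.getD r 0 - s.getD l 0 > 1
      · rw [dif_pos h]
        obtain ⟨i1, i2, i3, i4⟩ := ih (l + 1) (by omega) (by omega)
        refine ⟨by omega, i2, i3, ?_⟩
        intro k hk hk2
        rcases Nat.eq_or_lt_of_le hk with hk' | hk'
        · subst hk'; exact h.2
        · exact i4 k hk' hk2
      · rw [dif_neg h]
        push Not at h
        refine ⟨le_rfl, hlr, ?_, fun k hk hk2 => absurd hk2 (by omega)⟩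
        rcases Nat.lt_or_ge l r with hlt | hge
        · have := h hlt; omega
        · have : l = r := by omega
          subst this; omega
  exact fun l hlr => key (r - l) l le_rfl hlr

-- starting the while loop from any l all of whose predecessors violate the window
-- condition gives the same result as starting from 0
lemma pvAdvance_eq_zero_start (s : List Int) (r l : Nat) (hlr : l ≤ r)
    (h : ∀ k, k < l → s.getD r 0 - s.getD k 0 > 1) :
    pvAdvance s r l = pvAdvance s r 0 := by
  obtain ⟨a1, a2, a3, a4⟩ := pvAdvance_spec s r 0 (Nat.zero_le r)
  obtain ⟨b1, b2, b3, b4⟩ := pvAdvance_spec s r l hlr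
  rcases Nat.lt_trichotomy (pvAdvance s r l) (pvAdvance s r 0) with hlt | heq | hgt
  · have h1 := a4 (pvAdvance s r l) (Nat.zero_le _) hlt
    omega
  · exact heq
  · rcases Nat.lt_or_ge (pvAdvance s r 0) l with hc | hc
    · have h1 := h (pvAdvance s r 0) hc
      omega
    · have h1 := b4 (pvAdvance s r 0) hc hgt
      omega

-- the left pointer carried by B's fold after m iterations
def pvL (s : List Int) : Nat → Nat
  | 0 => 0
  | Nat.succ k => pvAdvance s k 0

-- B's fold unrolled: the state after m iterations
lemma pvFold_inv (s : List Int)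
    (hmono : ∀ i j : Nat, i ≤ j → j < s.length → s.getD i 0 ≤ s.getD j 0) :
    ∀ m, m ≤ s.length →
    (List.range m).foldl
      (fun (st : Nat × List Int) r =>
        (pvAdvance s r st.1, st.2 ++ [((r : Int) - (pvAdvance s r st.1 : Int) + 1)]))
      (0, []) =
    (pvL s m, (List.range m).map (fun (r : Nat) => ((r : Int) - (pvAdvance s r 0 : Int) + 1))) := by
  intro m
  induction m with
  | zero => intro _; rfl
  | succ k ih =>
    intro hm
    rw [List.range_succ, List.foldl_append, List.map_append, ih (by omega)]
    simp only [List.foldl_cons, List.foldl_nil, List.map_cons, List.map_nil]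
    have hstart : pvAdvance s k (pvL s k) = pvAdvance s k 0 := by
      cases k with
      | zero => rfl
      | succ j =>
        obtain ⟨a1, a2, a3, a4⟩ := pvAdvance_spec s j 0 (Nat.zero_le j)
        refine pvAdvance_eq_zero_start s (j + 1) (pvAdvance s j 0) (by omega) ?_
        intro i hi
        have h1 := a4 i (Nat.zero_le i) hi
        have h2 := hmono j (j + 1) (by omega) (by omega)
        omega
    rw [hstart]
    rfl

-- counting a two-valued predicate is the sum of two counts
lemma pvCountP_pair (v : Int) (l : List Int) :
    l.countP (fun w => decide (w = v - 1 ∨ w = v)) = l.count (v - 1) + l.count v := by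
  induction l with
  | nil => simp
  | cons w t ih =>
    simp only [List.countP_cons, List.count_cons, ih]
    by_cases h1 : w = v - 1 <;> by_cases h2 : w = v <;>
      simp [h1, h2, show v ≠ v - 1 by omega, show v - 1 ≠ v by omega] <;> omega

-- sorted(a) is monotone position-wise (stated with getD for the in-range accesses)
lemma pvMono (a : List Int) (i j : Nat) (hij : i ≤ j)
    (hj : j < (PySem.List.sorted a (fun x => x) false).length) :
    (PySem.List.sorted a (fun x => x) false).getD i 0 ≤
      (PySem.List.sorted a (fun x => x) false).getD j 0 := by
  rw [List.getD_eq_getElem _ 0 (by omega), List.getD_eq_getElem _ 0 hj]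
  exact PySem.List.sorted_id_getElem_mono a hij hj

-- inside the window [pvAdvance s r 0, r] every element is s[r]-1 or s[r]
lemma pvSeg_countP (s : List Int)
    (hmono : ∀ i j : Nat, i ≤ j → j < s.length → s.getD i 0 ≤ s.getD j 0)
    (r : Nat) (hr : r < s.length) :
    ((s.take (r + 1)).drop (pvAdvance s r 0)).countP
      (fun w => decide (w = s.getD r 0 - 1 ∨ w = s.getD r 0)) = r + 1 - pvAdvance s r 0 := by
  obtain ⟨a1, a2, a3, a4⟩ := pvAdvance_spec s r 0 (Nat.zero_le r)
  have hlen : ((s.take (r + 1)).drop (pvAdvance s r 0)).length = r + 1 - pvAdvance s r 0 := by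
    simp only [List.length_drop, List.length_take]
    omega
  have hall : ∀ w ∈ (s.take (r + 1)).drop (pvAdvance s r 0),
      (decide (w = s.getD r 0 - 1 ∨ w = s.getD r 0)) = true := by
    intro w hw
    obtain ⟨j, hj, hwj⟩ := List.mem_iff_getElem.mp hw
    rw [hlen] at hj
    have hj' : pvAdvance s r 0 + j < s.length := by omega
    have hw1 : w = s[pvAdvance s r 0 + j]'hj' := by
      rw [← hwj, List.getElem_drop, List.getElem_take]
    have hLjr : pvAdvance s r 0 + j ≤ r := by omega
    have h1 : s.getD (pvAdvance s r 0 + j) 0 ≤ s.getD r 0 := hmono _ _ hLjr hr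
    have h2 : s.getD (pvAdvance s r 0) 0 ≤ s.getD (pvAdvance s r 0 + j) 0 :=
      hmono _ _ (Nat.le_add_right _ _) hj'
    have h3 : s.getD (pvAdvance s r 0 + j) 0 = w := by
      rw [hw1, List.getD_eq_getElem _ 0 hj']
    simp only [decide_eq_true_eq]
    omega
  rw [List.countP_eq_length.mpr hall]
  exact hlen

-- at the last position r of its value, the window [pvAdvance s r 0, r] contains
-- exactly the occurrences of s[r]-1 and s[r]
lemma pvWindow_count (s : List Int)
    (hmono : ∀ i j : Nat, i ≤ j → j < s.length → s.getD i 0 ≤ s.getD j 0)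
    (r : Nat) (hr : r < s.length)
    (hlast : ∀ k, r < k → k < s.length → s.getD k 0 ≠ s.getD r 0) :
    s.count (s.getD r 0 - 1) + s.count (s.getD r 0) = r + 1 - pvAdvance s r 0 := by
  obtain ⟨a1, a2, a3, a4⟩ := pvAdvance_spec s r 0 (Nat.zero_le r)
  have h0 := List.countP_append (p := fun w => decide (w = s.getD r 0 - 1 ∨ w = s.getD r 0))
    (l₁ := s.take (r + 1)) (l₂ := s.drop (r + 1))
  rw [List.take_append_drop] at h0
  have hdrop : (s.drop (r + 1)).countP
      (fun w => decide (w = s.getD r 0 - 1 ∨ w = s.getD r 0)) = 0 := by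
    apply List.countP_eq_zero.mpr
    intro w hw
    obtain ⟨j, hj, hwj⟩ := List.mem_iff_getElem.mp hw
    have hj' : r + 1 + j < s.length := by
      simp only [List.length_drop] at hj; omega
    have hw1 : s.getD (r + 1 + j) 0 = w := by
      rw [List.getD_eq_getElem _ 0 hj', ← hwj, List.getElem_drop]
    have h1 : s.getD r 0 ≤ s.getD (r + 1 + j) 0 := hmono r (r + 1 + j) (by omega) hj'
    have h2 : s.getD (r + 1 + j) 0 ≠ s.getD r 0 := hlast _ (by omega) hj'
    simp only [decide_eq_true_eq]
    omega
  have htake : (s.take (r + 1)).countP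
      (fun w => decide (w = s.getD r 0 - 1 ∨ w = s.getD r 0)) =
      (s.take (pvAdvance s r 0)).countP (fun w => decide (w = s.getD r 0 - 1 ∨ w = s.getD r 0)) +
      ((s.take (r + 1)).drop (pvAdvance s r 0)).countP
        (fun w => decide (w = s.getD r 0 - 1 ∨ w = s.getD r 0)) := by
    have ht := List.countP_append (p := fun w => decide (w = s.getD r 0 - 1 ∨ w = s.getD r 0))
      (l₁ := (s.take (r + 1)).take (pvAdvance s r 0))
      (l₂ := (s.take (r + 1)).drop (pvAdvance s r 0))
    rw [List.take_append_drop, List.take_take, min_eq_left (by omega)] at ht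
    exact ht
  have hpre : (s.take (pvAdvance s r 0)).countP
      (fun w => decide (w = s.getD r 0 - 1 ∨ w = s.getD r 0)) = 0 := by
    apply List.countP_eq_zero.mpr
    intro w hw
    obtain ⟨j, hj, hwj⟩ := List.mem_iff_getElem.mp hw
    have hjL : j < pvAdvance s r 0 := by
      simp only [List.length_take] at hj; omega
    have hj' : j < s.length := by omega
    have hw1 : s.getD j 0 = w := by
      rw [List.getD_eq_getElem _ 0 hj', ← hwj, List.getElem_take]
    have h1 := a4 j (Nat.zero_le j) hjL
    simp only [decide_eq_true_eq]
    omega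
  have hseg := pvSeg_countP s hmono r hr
  have := pvCountP_pair (s.getD r 0) s
  omega

-- every window length is at most some count(c)+count(c+1) with c a value of a
lemma pvLen_le (a : List Int) (r : Nat)
    (hr : r < (PySem.List.sorted a (fun x => x) false).length) :
    ∃ c ∈ PySem.Set.ofList a,
      (r : Int) - (pvAdvance (PySem.List.sorted a (fun x => x) false) r 0 : Int) + 1 ≤
        (List.count c a : Int) + (List.count (c + 1) a : Int) := by
  set s := PySem.List.sorted a (fun x => x) false with hs
  have hmono : ∀ i j : Nat, i ≤ j → j < s.length → s.getD i 0 ≤ s.getD j 0 := by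
    rw [hs]; exact fun i j hij hj => pvMono a i j hij hj
  obtain ⟨a1, a2, a3, a4⟩ := pvAdvance_spec s r 0 (Nat.zero_le r)
  have hseg := pvSeg_countP s hmono r hr
  have hsub : ((s.take (r + 1)).drop (pvAdvance s r 0)).Sublist s :=
    (List.drop_sublist _ _).trans (List.take_sublist _ _)
  have hcount : r + 1 - pvAdvance s r 0 ≤ s.count (s.getD r 0 - 1) + s.count (s.getD r 0) := by
    rw [← pvCountP_pair, ← hseg]
    exact hsub.countP_le
  have hperm : s.Perm a := by rw [hs]; exact PySem.List.sorted_perm a (fun x => x) false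
  rw [hperm.count_eq, hperm.count_eq] at hcount
  have hva : s.getD r 0 ∈ a := by
    refine hperm.mem_iff.mp ?_
    rw [List.getD_eq_getElem _ 0 hr]
    exact List.getElem_mem hr
  by_cases hv1 : s.getD r 0 - 1 ∈ a
  · refine ⟨s.getD r 0 - 1, (PySem.Set.mem_ofList _ _).mpr hv1, ?_⟩
    rw [show s.getD r 0 - 1 + 1 = s.getD r 0 by ring]
    omega
  · have h0 : a.count (s.getD r 0 - 1) = 0 := List.count_eq_zero.mpr hv1
    refine ⟨s.getD r 0, (PySem.Set.mem_ofList _ _).mpr hva, ?_⟩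
    have hnn : (0 : Int) ≤ (List.count (s.getD r 0 + 1) a : Int) := Int.natCast_nonneg _
    omega

-- every count(x)+count(x+1) with x a value of a is attained by some window length
lemma pvLen_ge (a : List Int) (x : Int) (hx : x ∈ PySem.Set.ofList a) :
    ∃ r : Nat, r < (PySem.List.sorted a (fun x => x) false).length ∧
      (List.count x a : Int) + (List.count (x + 1) a : Int) ≤
        (r : Int) - (pvAdvance (PySem.List.sorted a (fun x => x) false) r 0 : Int) + 1 := by
  set s := PySem.List.sorted a (fun x => x) false with hs
  have hmono : ∀ i j : Nat, i ≤ j → j < s.length → s.getD i 0 ≤ s.getD j 0 := by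
    rw [hs]; exact fun i j hij hj => pvMono a i j hij hj
  have hperm : s.Perm a := by rw [hs]; exact PySem.List.sorted_perm a (fun x => x) false
  have hxa : x ∈ a := (PySem.Set.mem_ofList _ _).mp hx
  have key : ∀ v : Int, v ∈ a → ∃ r : Nat, r < s.length ∧
      (List.count (v - 1) a : Int) + (List.count v a : Int) =
        (r : Int) - (pvAdvance s r 0 : Int) + 1 := by
    intro v hv
    have hvs : v ∈ s := hperm.mem_iff.mpr hv
    obtain ⟨i, hi, hiv⟩ := List.mem_iff_getElem.mp hvs
    have hPi : s.getD i 0 = v := by rw [List.getD_eq_getElem _ 0 hi]; exact hiv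
    have hPr : s.getD (Nat.findGreatest (fun k => s.getD k 0 = v) (s.length - 1)) 0 = v :=
      Nat.findGreatest_spec (P := fun k => s.getD k 0 = v) (m := i) (show i ≤ s.length - 1 by omega) hPi
    have hrn : Nat.findGreatest (fun k => s.getD k 0 = v) (s.length - 1) < s.length := by
      have := Nat.findGreatest_le (P := fun k => s.getD k 0 = v) (s.length - 1)
      omega
    have hlast : ∀ k, Nat.findGreatest (fun k => s.getD k 0 = v) (s.length - 1) < k →
        k < s.length →
        s.getD k 0 ≠ s.getD (Nat.findGreatest (fun k => s.getD k 0 = v) (s.length - 1)) 0 := by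
      intro k hk1 hk2
      have := Nat.findGreatest_is_greatest (P := fun k => s.getD k 0 = v) hk1 (by omega)
      rw [hPr]
      exact this
    have hw := pvWindow_count s hmono _ hrn hlast
    rw [hPr] at hw
    obtain ⟨a1, a2, a3, a4⟩ :=
      pvAdvance_spec s (Nat.findGreatest (fun k => s.getD k 0 = v) (s.length - 1)) 0
        (Nat.zero_le _)
    refine ⟨Nat.findGreatest (fun k => s.getD k 0 = v) (s.length - 1), hrn, ?_⟩
    rw [← hperm.count_eq (v - 1), ← hperm.count_eq v]
    omega
  by_cases hx1 : (x + 1) ∈ a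
  · obtain ⟨r, hrn, he⟩ := key (x + 1) hx1
    rw [show x + 1 - 1 = x by ring] at he
    exact ⟨r, hrn, le_of_eq he⟩
  · obtain ⟨r, hrn, he⟩ := key x hxa
    have h0 : a.count (x + 1) = 0 := List.count_eq_zero.mpr hx1
    have hnn : (0 : Int) ≤ (List.count (x - 1) a : Int) := Int.natCast_nonneg _
    exact ⟨r, hrn, by omega⟩

-- B computes pvMidVal
lemma pvB_eq_mid (a : List Int) (hne : a ≠ []) : pickingNumbers_alt a = pvMidVal a := by
  have hmono : ∀ i j : Nat, i ≤ j → j < (PySem.List.sorted a (fun x => x) false).length →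
      (PySem.List.sorted a (fun x => x) false).getD i 0 ≤
        (PySem.List.sorted a (fun x => x) false).getD j 0 :=
    fun i j hij hj => pvMono a i j hij hj
  have hsne : PySem.List.sorted a (fun x => x) false ≠ [] := by
    intro h
    exact hne ((PySem.List.sorted_eq_nil_iff _ _ _).mp h)
  have hn : 0 < (PySem.List.sorted a (fun x => x) false).length := List.length_pos_of_ne_nil hsne
  have hfold := pvFold_inv (PySem.List.sorted a (fun x => x) false) hmono
    (PySem.List.sorted a (fun x => x) false).length le_rfl
  simp only [pickingNumbers_alt, pvMidVal]
  rw [hfold]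
  dsimp only
  cases hmax : PySem.List.max?
      ((List.range (PySem.List.sorted a (fun x => x) false).length).map
        (fun (r : Nat) =>
          ((r : Int) - (pvAdvance (PySem.List.sorted a (fun x => x) false) r 0 : Int) + 1)))
      (fun v => v) with
  | none =>
    exfalso
    have := (PySem.List.max?_eq_none_iff _ _).mp hmax
    rw [List.map_eq_nil_iff, List.range_eq_nil] at this
    omega
  | some mL =>
    cases hmid : PySem.List.max?
        ((PySem.Set.ofList a).map
          (fun x => ((List.count x a : Int) + (List.count (x + 1) a : Int))))
        (fun v => v) with
    | none =>
      exfalso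
      have h := (PySem.List.max?_eq_none_iff _ _).mp hmid
      rw [List.map_eq_nil_iff] at h
      obtain ⟨y, hy⟩ := List.exists_mem_of_ne_nil a hne
      have hmem : y ∈ PySem.Set.ofList a := (PySem.Set.mem_ofList _ _).mpr hy
      rw [h] at hmem
      exact List.not_mem_nil hmem
    | some mM =>
      dsimp only
      apply le_antisymm
      · obtain ⟨r, hrmem, hfr⟩ := List.mem_map.mp (PySem.List.max?_mem hmax)
        have hrn : r < (PySem.List.sorted a (fun x => x) false).length := List.mem_range.mp hrmem
        obtain ⟨c, hc, hle⟩ := pvLen_le a r hrn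
        have h2 : (List.count c a : Int) + (List.count (c + 1) a : Int) ≤ mM :=
          PySem.List.max?_isMax hmid _ (List.mem_map.mpr ⟨c, hc, rfl⟩)
        omega
      · obtain ⟨x, hx, hxm⟩ := List.mem_map.mp (PySem.List.max?_mem hmid)
        obtain ⟨r, hrn, hge⟩ := pvLen_ge a x hx
        have h2 : ((r : Int) - (pvAdvance (PySem.List.sorted a (fun x => x) false) r 0 : Int) + 1) ≤ mL :=
          PySem.List.max?_isMax hmax _ (List.mem_map.mpr ⟨r, List.mem_range.mpr hrn, rfl⟩)
        omega

-- ===== VERDICT (by name: the statement is the Claim_ definition above) =====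
theorem pickingNumbers_spec : Claim_equal_pickingNumbers := by
  intro a _hdom hne
  unfold Spec_pickingNumbers
  rw [pvA_eq_mid a hne, pvB_eq_mid a hne]
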